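-- pv_equiv track=rewrite | github.com/k30035600/younsu | tools/md_blank_lines_to_hr.py | _replace_empty_runs
-- ===== SOURCE A (Python) =====
-- def _replace_empty_runs(s: str, min_run: int) -> str:
--     lines = s.split("\n")
--     result: list[str] = []
--     i = 0
--     while i < len(lines):
--         line = lines[i]
--         if line.strip() == "":
--             j = i
--             while j < len(lines) and lines[j].strip() == "":
--                 j += 1
--             k = j - i
--             if k >= min_run:
--                 for _ in range(k):
--                     result.append("---")
--             else:
--                 result.extend(lines[i:j])
--             i = j
--         else:
--             result.append(line)
--             i += 1
--     return "\n".join(result)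
-- ===== SOURCE B (Python) =====
-- def _flush(pending, min_run):
--     return ["---"] * len(pending) if len(pending) >= min_run else pending
--
-- def _replace_empty_runs(s: str, min_run: int) -> str:
--     out = []
--     pending = []
--     for line in s.split("\n"):
--         if line.strip() == "":
--             pending.append(line)
--         else:
--             out.extend(_flush(pending, min_run))
--             pending = []
--             out.append(line)
--     out.extend(_flush(pending, min_run))
--     return "\n".join(out)
-- ===== Notes on version B (the rewrite author's own statement) =====
-- stated objective: simpler
-- what changed: Replaced A's index-based scan with a nested inner while and slicing by a single pass that accumulates the current blank run in a pending list and flushes it (as '---' markers or verbatim) at each non-blank line and at the end.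
import Mathlib
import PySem

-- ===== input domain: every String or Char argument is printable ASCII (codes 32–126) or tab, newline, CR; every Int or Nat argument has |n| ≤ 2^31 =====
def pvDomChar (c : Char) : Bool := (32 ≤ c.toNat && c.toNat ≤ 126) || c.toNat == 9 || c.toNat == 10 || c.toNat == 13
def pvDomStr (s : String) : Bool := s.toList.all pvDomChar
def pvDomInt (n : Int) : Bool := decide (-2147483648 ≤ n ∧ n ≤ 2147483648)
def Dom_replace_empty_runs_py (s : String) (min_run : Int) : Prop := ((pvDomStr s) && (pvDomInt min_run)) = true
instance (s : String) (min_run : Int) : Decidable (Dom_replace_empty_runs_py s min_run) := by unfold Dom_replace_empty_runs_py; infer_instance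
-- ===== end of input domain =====

-- B replaces A's index scan with inner while by a single pass with a pending blank-run accumulator; objective: simpler.

-- ===== PORT A =====
-- line.strip() == ""
def pvBlank (l : String) : Bool := PySem.Str.strip l == ""

-- the outer while loop of A over the remaining suffix of `lines`; the inner while
-- (counting consecutive blank lines from position i) is the takeWhile-length `k`.
def pvALoop (min_run : Int) : List String → List String
  | [] => []
  | l :: ls =>
    if pvBlank l then
      let k : Nat := 1 + (ls.takeWhile pvBlank).length
      (if (k : Int) ≥ min_run then List.replicate k "---" else (l :: ls).take k)
        ++ pvALoop min_run (ls.drop ((ls.takeWhile pvBlank).length))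
    else
      l :: pvALoop min_run ls
  termination_by ls => ls.length
  decreasing_by
    · simp only [List.length_drop, List.length_cons]; omega
    · simp

def replace_empty_runs_py (s : String) (min_run : Int) : String :=
  PySem.Str.join "\n" (pvALoop min_run ((PySem.Str.split? s "\n").getD []))

-- ===== PORT B =====
def pvFlush (pending : List String) (min_run : Int) : List String :=
  if (pending.length : Int) ≥ min_run then List.replicate pending.length "---" else pending

-- B's single for-loop with the `pending` accumulator; the output suffix is returned.
def pvBLoop (min_run : Int) (pending : List String) : List String → List String
  | [] => pvFlush pending min_run
  | l :: ls =>
    if pvBlank l then pvBLoop min_run (pending ++ [l]) ls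
    else pvFlush pending min_run ++ l :: pvBLoop min_run [] ls

def replace_empty_runs_py_alt (s : String) (min_run : Int) : String :=
  PySem.Str.join "\n" (pvBLoop min_run [] ((PySem.Str.split? s "\n").getD []))

-- ===== PRECONDITION & SPEC =====
def Spec_replace_empty_runs_py (s : String) (min_run : Int) (out : String) : Prop := out = replace_empty_runs_py_alt s min_run
instance (s : String) (min_run : Int) (out : String) : Decidable (Spec_replace_empty_runs_py s min_run out) := by unfold Spec_replace_empty_runs_py; infer_instance

-- ===== CLAIM (what is proved, stated in full; the proofs are below) =====
def Claim_equal_replace_empty_runs_py : Prop := ∀ (s : String) (min_run : Int), Dom_replace_empty_runs_py s min_run → Spec_replace_empty_runs_py s min_run (replace_empty_runs_py s min_run)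

-- ===== LEMMAS AND PROOFS =====

-- A consumes a maximal blank run `pending ++ …` in one outer-loop step, emitting exactly B's flush.
theorem pvALoop_blank_prefix (min_run : Int) (pending rest : List String)
    (hb : ∀ x ∈ pending, pvBlank x = true)
    (hr : rest = [] ∨ ∃ l ls, rest = l :: ls ∧ pvBlank l = false) :
    pvALoop min_run (pending ++ rest) = pvFlush pending min_run ++ pvALoop min_run rest := by
  match pending, hb with
  | [], _ =>
    simp only [List.nil_append, pvFlush, List.length_nil, Nat.cast_zero]
    split <;> simp
  | p :: ps, hb =>
    have hp : pvBlank p = true := hb p (by simp)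
    have hps : ∀ x ∈ ps, pvBlank x = true := fun x hx => hb x (by simp [hx])
    have htw : (ps ++ rest).takeWhile pvBlank = ps := by
      rw [List.takeWhile_append]
      have h1 : ps.takeWhile pvBlank = ps := List.takeWhile_eq_self_iff.mpr hps
      rw [h1]
      simp
      rcases hr with h | ⟨l, ls, rfl, hl⟩
      · simp [h]
      · simp [hl]
    rw [List.cons_append, pvALoop, if_pos hp]
    simp only [htw]
    have hdrop : (ps ++ rest).drop ps.length = rest := by
      simp
    have htake : (p :: (ps ++ rest)).take (1 + ps.length) = p :: ps := by
      rw [Nat.add_comm, List.take_succ_cons, List.take_append_of_le_length le_rfl,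
        List.take_length]
    rw [hdrop, htake]
    unfold pvFlush
    congr 1
    rw [show (p :: ps).length = 1 + ps.length from by simp [Nat.add_comm]]

theorem pvBLoop_eq_pvALoop (min_run : Int) (ls pending : List String)
    (hb : ∀ x ∈ pending, pvBlank x = true) :
    pvBLoop min_run pending ls = pvALoop min_run (pending ++ ls) := by
  induction ls generalizing pending with
  | nil =>
    rw [pvBLoop, pvALoop_blank_prefix min_run pending [] hb (Or.inl rfl)]
    simp [pvALoop]
  | cons l ls ih =>
    by_cases hl : pvBlank l = true
    · rw [pvBLoop, if_pos hl, ih (pending ++ [l]) (by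
        intro x hx
        rcases List.mem_append.mp hx with h | h
        · exact hb x h
        · simp at h; subst h; exact hl)]
      simp
    · rw [pvBLoop, if_neg hl,
        pvALoop_blank_prefix min_run pending (l :: ls) hb
          (Or.inr ⟨l, ls, rfl, by simpa using hl⟩),
        pvALoop, if_neg hl, ih [] (by simp)]
      simp

-- ===== VERDICT (by name: the statement is the Claim_ definition above) =====
theorem replace_empty_runs_py_spec : Claim_equal_replace_empty_runs_py := by
  intro s min_run _
  unfold Spec_replace_empty_runs_py replace_empty_runs_py replace_empty_runs_py_alt
  rw [pvBLoop_eq_pvALoop min_run _ [] (by simp), List.nil_append]
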